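-- pv_equiv track=rewrite | github.com/Yumeansfish/Trustme-backend-overlay | trustme-api/trustme_api/browser/dashboard/domain_service.py | _normalize_filter_categories
-- ===== SOURCE A (Python) =====
-- from typing import Any, Dict, Iterable, List, Optional, Sequence
--
-- def _normalize_filter_categories(filter_categories: Sequence[Sequence[str]]) -> List[List[str]]:
--     normalized: List[List[str]] = []
--     seen = set()
--     for category in filter_categories:
--         if not isinstance(category, Sequence) or isinstance(category, (str, bytes)):
--             continue
--         parts = [str(part).strip() for part in category if isinstance(part, str) and part.strip()]
--         if not parts:
--             continue
--         key = tuple(parts)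
--         if key in seen:
--             continue
--         seen.add(key)
--         normalized.append(parts)
--     return normalized
-- ===== SOURCE B (Python) =====
-- from typing import Any, Dict, Iterable, List, Optional, Sequence
--
-- def _normalize_filter_categories(filter_categories: Sequence[Sequence[str]]) -> List[List[str]]:
--     # Phase 1: normalize each category into its list of stripped non-empty parts.
--     candidates: List[List[str]] = []
--     for category in filter_categories:
--         if not isinstance(category, Sequence) or isinstance(category, (str, bytes)):
--             continue
--         parts = [str(part).strip() for part in category if isinstance(part, str) and part.strip()]
--         if parts:
--             candidates.append(parts)
--     # Phase 2: dedup by repeated filtering (nub): take the head, drop every later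
--     # copy of it from the remainder, repeat. No seen-set/dict is maintained; the
--     # first occurrence of each value survives, in order, exactly as in A.
--     result: List[List[str]] = []
--     while candidates:
--         head = candidates[0]
--         result.append(head)
--         candidates = [c for c in candidates[1:] if c != head]
--     return result
-- ===== Notes on version B (the rewrite author's own statement) =====
-- stated objective: alternative
-- what changed: Replaces A's single interleaved loop with a hash seen-set by a two-phase design: a normalize pass collecting candidates, then a filtering nub (repeatedly take the head and filter every later copy out of the remainder) that maintains no seen-set or dict at all.
import Mathlib
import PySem

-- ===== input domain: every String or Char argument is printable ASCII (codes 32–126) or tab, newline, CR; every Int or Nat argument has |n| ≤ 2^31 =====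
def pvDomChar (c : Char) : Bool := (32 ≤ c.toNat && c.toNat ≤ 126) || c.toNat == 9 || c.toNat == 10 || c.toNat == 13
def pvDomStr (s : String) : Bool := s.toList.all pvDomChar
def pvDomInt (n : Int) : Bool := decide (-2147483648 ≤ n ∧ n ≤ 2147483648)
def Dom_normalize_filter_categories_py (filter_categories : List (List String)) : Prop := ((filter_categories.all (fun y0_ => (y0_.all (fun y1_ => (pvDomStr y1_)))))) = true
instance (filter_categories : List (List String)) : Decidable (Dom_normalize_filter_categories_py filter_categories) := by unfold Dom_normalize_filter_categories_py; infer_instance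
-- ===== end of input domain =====

-- B replaces A's interleaved loop + seen-set by a normalize pass followed by a filtering nub (no set/dict); objective: alternative.


-- ===== PORT A =====
-- the shared comprehension: [str(part).strip() for part in category if isinstance(part, str) and part.strip()]
def pvPartsOf (category : List String) : List String :=
  (category.filter (fun p => PySem.Str.strip p != "")).map PySem.Str.strip

-- one iteration of A's loop body over the state (normalized, seen)
def pvStepA (st : List (List String) × PySem.Set (List String)) (category : List String) :
    List (List String) × PySem.Set (List String) :=
  let parts := pvPartsOf category
  if parts.isEmpty then st
  else if PySem.Set.contains st.2 parts then st
  else (st.1 ++ [parts], PySem.Set.add st.2 parts)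

def normalize_filter_categories_py (filter_categories : List (List String)) : List (List String) :=
  (filter_categories.foldl pvStepA (([] : List (List String)), (PySem.Set.empty : PySem.Set (List String)))).1

-- ===== PORT B =====
-- phase 2 of Source B: the while-loop 'take head, filter it out of the rest, repeat'
def pvNub : List (List String) → List (List String)
  | [] => []
  | h :: t => h :: pvNub (t.filter (fun c => c != h))
termination_by xs => xs.length
decreasing_by
  simp only [List.length_unattach, List.length_cons]
  exact Nat.lt_succ_of_le (le_trans (List.length_filter_le _ _) (by simp))

def normalize_filter_categories_py_alt (filter_categories : List (List String)) : List (List String) :=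
  -- phase 1: candidates
  let candidates := filter_categories.foldl
    (fun acc category =>
      let parts := pvPartsOf category
      if !parts.isEmpty then acc ++ [parts] else acc) []
  -- phase 2: filtering nub
  pvNub candidates

-- ===== PRECONDITION & SPEC =====
def Spec_normalize_filter_categories_py (filter_categories : List (List String)) (out : List (List String)) : Prop := out = normalize_filter_categories_py_alt filter_categories
instance (filter_categories : List (List String)) (out : List (List String)) : Decidable (Spec_normalize_filter_categories_py filter_categories out) := by unfold Spec_normalize_filter_categories_py; infer_instance

-- ===== CLAIM (what is proved, stated in full; the proofs are below) =====
def Claim_equal_normalize_filter_categories_py : Prop := ∀ (filter_categories : List (List String)), Dom_normalize_filter_categories_py filter_categories → Spec_normalize_filter_categories_py filter_categories (normalize_filter_categories_py filter_categories)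

-- ===== LEMMAS AND PROOFS =====

-- A's loop, started in a state whose normalized list and seen set coincide, keeps them equal
-- and extends them by Set.add over exactly the non-empty candidate parts.
lemma pvFoldA_eq (fc : List (List String)) :
    ∀ (s : List (List String)),
      fc.foldl pvStepA (s, s) =
        (PySem.Set.update s ((fc.filter (fun c => !(pvPartsOf c).isEmpty)).map pvPartsOf),
         PySem.Set.update s ((fc.filter (fun c => !(pvPartsOf c).isEmpty)).map pvPartsOf)) := by
  induction fc with
  | nil => intro s; simp [PySem.Set.update]
  | cons c fc ih =>
    intro s
    by_cases h : (pvPartsOf c).isEmpty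
    · simp only [List.foldl_cons, pvStepA, h]
      simp [h, ih s]
    · have hstep : pvStepA (s, s) c = (PySem.Set.add s (pvPartsOf c), PySem.Set.add s (pvPartsOf c)) := by
        simp only [pvStepA, h, PySem.Set.add, PySem.Set.contains]
        split_ifs with hm <;> simp_all
      simp only [List.foldl_cons, hstep, ih (PySem.Set.add s (pvPartsOf c))]
      simp [h, PySem.Set.update]

-- once the seen set contains a, later occurrences of a are no-ops: dropping them changes nothing
lemma pvFoldAdd_filter (ys : List (List String)) :
    ∀ (s : List (List String)) (a : List String), a ∈ s →
      ys.foldl PySem.Set.add s = (ys.filter (fun c => c != a)).foldl PySem.Set.add s := by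
  induction ys with
  | nil => intros; rfl
  | cons y ys ih =>
    intro s a ha
    by_cases hy : y = a
    · subst hy
      have : PySem.Set.add s y = s := by simp [PySem.Set.add, PySem.Set.contains, ha]
      simp [this, ih s y ha]
    · have ha' : a ∈ PySem.Set.add s y := by
        simp [PySem.Set.add]; split_ifs <;> simp [ha]
      simp [hy, ih _ a ha']

-- a head already in the accumulator stays in front: folding add over ys avoiding a commutes with the cons
lemma pvFoldAdd_cons (ys : List (List String)) :
    ∀ (s : List (List String)) (a : List String), a ∉ ys →
      ys.foldl PySem.Set.add (a :: s) = a :: ys.foldl PySem.Set.add s := by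
  induction ys with
  | nil => intros; rfl
  | cons y ys ih =>
    intro s a ha
    have hy : y ≠ a := fun h => ha (by simp [h])
    have : PySem.Set.add (a :: s) y = a :: PySem.Set.add s y := by
      simp [PySem.Set.add, PySem.Set.contains, hy]
      split_ifs <;> rfl
    rw [List.foldl_cons, this, List.foldl_cons, ih _ a (fun h => ha (by simp [h]))]

-- the filtering nub computes first-occurrence dedup, i.e. Set.ofList
lemma pvNub_eq_ofList (xs : List (List String)) : pvNub xs = PySem.Set.ofList xs := by
  induction hn : xs.length using Nat.strong_induction_on generalizing xs with
  | _ n ih =>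
  match xs with
  | [] => simp only [pvNub]; rfl
  | h :: t =>
    simp only [pvNub]
    have ih := ih (t.filter (fun c => c != h)).length
      (by subst hn; exact Nat.lt_succ_of_le (List.length_filter_le _ _))
      (t.filter (fun c => c != h)) rfl
    have h1 : PySem.Set.ofList (h :: t) = t.foldl PySem.Set.add [h] := by
      simp [PySem.Set.ofList, PySem.Set.add, PySem.Set.contains]
    have h2 : t.foldl PySem.Set.add [h]
        = (t.filter (fun c => c != h)).foldl PySem.Set.add [h] :=
      pvFoldAdd_filter t [h] h (by simp)
    have h3 : h ∉ t.filter (fun c => c != h) := by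
      intro hm
      have := List.of_mem_filter hm
      simp at this
    rw [h1, h2, pvFoldAdd_cons _ [] h h3, ih]
    rfl

-- ===== VERDICT (by name: the statement is the Claim_ definition above) =====
theorem normalize_filter_categories_py_spec : Claim_equal_normalize_filter_categories_py := by
  intro fc _
  unfold Spec_normalize_filter_categories_py
  unfold normalize_filter_categories_py normalize_filter_categories_py_alt
  rw [show (PySem.Set.empty : PySem.Set (List String)) = ([] : List (List String)) from rfl,
      pvFoldA_eq fc []]
  rw [PySem.List.foldl_append_if (fun c => !(pvPartsOf c).isEmpty) pvPartsOf fc []]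
  rw [pvNub_eq_ofList]
  simp [PySem.Set.ofList, PySem.Set.update]
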